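-- pv_equiv track=rewrite | github.com/ivanilos/advent-of-code-2020 | 04/part_one.py | solve
-- ===== SOURCE A (Python) =====
-- def solve(passport):
-- 	needed_attr = ['byr', 'iyr', 'eyr', 'hgt', 'hcl', 'ecl', 'pid']
--
-- 	got = set()
-- 	for line in passport:
-- 		data = line.split()
-- 		for attr in data:
-- 			got.add(attr.split(':')[0])
--
-- 	for needed in needed_attr:
-- 		if needed not in got:
-- 			return False
--
-- 	return True
-- ===== SOURCE B (Python) =====
-- def solve(passport):
--     needed_attr = ['byr', 'iyr', 'eyr', 'hgt', 'hcl', 'ecl', 'pid']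
--     return all(
--         any(attr.split(':')[0] == needed
--             for line in passport
--             for attr in line.split())
--         for needed in needed_attr
--     )
-- ===== Notes on version B (the rewrite author's own statement) =====
-- stated objective: alternative
-- what changed: B drops A's set data structure entirely: instead of one pass collecting all present keys into a set and a second pass checking membership, B does a direct brute-force search per required key (all/any generator over the passport), trading O(n+k) hashing for an O(k*n) scan.
import Mathlib
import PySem

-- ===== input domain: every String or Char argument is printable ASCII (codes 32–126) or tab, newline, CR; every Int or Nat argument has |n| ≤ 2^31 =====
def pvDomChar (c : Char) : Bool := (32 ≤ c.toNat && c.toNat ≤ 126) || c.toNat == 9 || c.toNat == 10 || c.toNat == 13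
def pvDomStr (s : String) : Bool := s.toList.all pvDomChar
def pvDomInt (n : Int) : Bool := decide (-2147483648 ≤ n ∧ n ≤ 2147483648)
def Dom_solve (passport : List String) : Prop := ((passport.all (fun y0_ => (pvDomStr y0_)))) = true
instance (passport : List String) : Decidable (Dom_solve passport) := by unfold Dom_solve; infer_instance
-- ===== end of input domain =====

-- B drops A's set entirely: a direct brute-force search per required key (all/any over the
-- passport) instead of collecting all present keys into a set and then checking membership.

-- attr.split(':')[0] — splitOn with a nonempty separator always yields a nonempty list, so [0] never raises
def pvKey (attr : String) : String := ((PySem.Str.split? attr ":").getD []).headD ""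

-- ===== PORT A =====
-- the final loop of A: 'for needed in needed_attr: if needed not in got: return False' then 'return True'
def pvCheckA (needed : List String) (got : PySem.Set String) : Bool :=
  match needed with
  | [] => true
  | n :: ns => if PySem.Set.contains got n then pvCheckA ns got else false

def solve (passport : List String) : Bool :=
  let needed_attr := ["byr", "iyr", "eyr", "hgt", "hcl", "ecl", "pid"]
  let got := passport.foldl
    (fun g line => (PySem.Str.split₀ line).foldl (fun g attr => PySem.Set.add g (pvKey attr)) g)
    PySem.Set.empty
  pvCheckA needed_attr got

-- ===== PORT B =====
-- any(attr.split(':')[0] == needed for line in passport for attr in line.split())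
def pvHasKey (passport : List String) (needed : String) : Bool :=
  passport.any (fun line => (PySem.Str.split₀ line).any (fun attr => pvKey attr == needed))

def solve_alt (passport : List String) : Bool :=
  let needed_attr := ["byr", "iyr", "eyr", "hgt", "hcl", "ecl", "pid"]
  needed_attr.all (fun needed => pvHasKey passport needed)

-- ===== PRECONDITION & SPEC =====
def Spec_solve (passport : List String) (out : Bool) : Prop := out = solve_alt passport
instance (passport : List String) (out : Bool) : Decidable (Spec_solve passport out) := by unfold Spec_solve; infer_instance

-- ===== CLAIM (what is proved, stated in full; the proofs are below) =====
def Claim_equal_solve : Prop := ∀ (passport : List String), Dom_solve passport → Spec_solve passport (solve passport)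

-- ===== LEMMAS AND PROOFS =====

-- the keys occurring in a list of lines
def pvKeys (lines : List String) : List String :=
  lines.flatMap (fun line => (PySem.Str.split₀ line).map pvKey)

theorem mem_got (lines : List String) (g : PySem.Set String) (y : String) :
    (y ∈ lines.foldl
      (fun g line => (PySem.Str.split₀ line).foldl (fun g attr => PySem.Set.add g (pvKey attr)) g) g)
    ↔ (y ∈ g ∨ y ∈ pvKeys lines) := by
  induction lines generalizing g with
  | nil => simp [pvKeys]
  | cons line rest ih =>
    simp only [List.foldl_cons, ih, PySem.Set.mem_foldl_add, pvKeys, List.flatMap_cons,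
      List.mem_append, List.mem_map]
    constructor
    · rintro (⟨hy | ⟨a, ha, he⟩⟩ | h)
      · exact Or.inl hy
      · exact Or.inr (Or.inl ⟨a, ha, he.symm⟩)
      · exact Or.inr (Or.inr h)
    · rintro (hy | ⟨a, ha, he⟩ | h)
      · exact Or.inl (Or.inl hy)
      · exact Or.inl (Or.inr ⟨a, ha, he.symm⟩)
      · exact Or.inr h

theorem pvCheckA_eq (needed : List String) (got : PySem.Set String) :
    pvCheckA needed got = decide (∀ n ∈ needed, n ∈ got) := by
  induction needed with
  | nil => simp [pvCheckA]
  | cons n ns ih =>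
    simp only [pvCheckA, ih]
    by_cases h : n ∈ got
    · rw [(PySem.Set.contains_iff got n).mpr h]
      simp [h]
    · have hc : PySem.Set.contains got n = false := by
        rcases Bool.eq_false_or_eq_true (PySem.Set.contains got n) with ht | hf
        · exact absurd ((PySem.Set.contains_iff got n).mp ht) h
        · exact hf
      rw [hc]
      exact (decide_eq_false (fun hall => h (hall n (List.mem_cons_self)))).symm

theorem pvHasKey_iff (passport : List String) (needed : String) :
    pvHasKey passport needed = true ↔ needed ∈ pvKeys passport := by
  simp only [pvHasKey, pvKeys, List.any_eq_true, List.mem_flatMap, List.mem_map, beq_iff_eq]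

-- ===== VERDICT (by name: the statement is the Claim_ definition above) =====
theorem solve_spec : Claim_equal_solve := by
  intro passport _
  unfold Spec_solve solve solve_alt
  rw [pvCheckA_eq]
  rw [Bool.eq_iff_iff]
  simp only [decide_eq_true_eq, List.all_eq_true]
  constructor
  · intro h n hn
    rw [pvHasKey_iff]
    rcases (mem_got passport PySem.Set.empty n).mp (h n hn) with h0 | hk
    · exact absurd h0 (by simp [PySem.Set.empty])
    · exact hk
  · intro h n hn
    exact (mem_got passport PySem.Set.empty n).mpr (Or.inr ((pvHasKey_iff passport n).mp (h n hn)))
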